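-- pv_equiv track=rewrite | github.com/LineageOS/scripts | dev/sepolicy/macro.py | combine_variable_choices
-- ===== SOURCE A (Python) =====
-- import itertools
-- from typing import (
--     Dict,
--     FrozenSet,
--     Generator,
--     Iterable,
--     List,
--     Optional,
--     Set,
--     Tuple,
-- )
--
-- def combine_variable_choices(
--     variables_choices: Dict[str, Set[str]],
-- ) -> Generator[Dict[str, str], None, None]:
--     # List of (variable_name, value) tuples for each possible value
--     # of each variable name
--     expanded_choices = [
--         [(k, v) for v in list(vals)] for k, vals in variables_choices.items()
--     ]
--
--     for values in itertools.product(*expanded_choices):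
--         yield dict(values)
-- ===== SOURCE B (Python) =====
-- def combine_variable_choices(variables_choices):
--     items = [(k, list(vals)) for k, vals in variables_choices.items()]
--
--     def rec(pairs):
--         if not pairs:
--             yield {}
--             return
--         (k, vals) = pairs[0]
--         rest = pairs[1:]
--         for v in vals:
--             for sub in rec(rest):
--                 yield {k: v, **sub}
--
--     yield from rec(items)
-- ===== Notes on version B (the rewrite author's own statement) =====
-- stated objective: alternative
-- what changed: Replaced itertools.product over pre-expanded (key,value) tuple lists plus a dict(tuples) rebuild per combination with a direct recursive generator over the (key, values) pairs that merges one binding per level, yielding the same dicts in the same order.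
import Mathlib
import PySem

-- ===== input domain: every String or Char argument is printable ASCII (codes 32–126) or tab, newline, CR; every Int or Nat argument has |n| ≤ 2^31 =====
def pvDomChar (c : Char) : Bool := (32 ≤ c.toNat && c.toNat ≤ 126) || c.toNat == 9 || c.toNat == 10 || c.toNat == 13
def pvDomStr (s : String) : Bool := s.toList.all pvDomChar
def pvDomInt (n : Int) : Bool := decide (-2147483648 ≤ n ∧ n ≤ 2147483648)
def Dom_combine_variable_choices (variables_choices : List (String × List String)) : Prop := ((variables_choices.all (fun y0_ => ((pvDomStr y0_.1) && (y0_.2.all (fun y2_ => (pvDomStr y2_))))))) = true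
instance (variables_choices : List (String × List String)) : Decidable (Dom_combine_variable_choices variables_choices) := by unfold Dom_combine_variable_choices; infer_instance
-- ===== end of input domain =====

-- B replaces itertools.product + dict(tuples) with a direct recursive generator over the
-- (key, values) pairs, yielding the same dicts in the same order (objective: alternative).

-- ===== PORT A =====
-- itertools.product(*xs) ported as the standard left fold extending each partial tuple.
def combine_variable_choices (variables_choices : List (String × List String)) : List (List (String × String)) :=
  let expanded_choices := variables_choices.map (fun kv => kv.2.map (fun v => (kv.1, v)))
  let prods := expanded_choices.foldl
    (fun acc choice => acc.flatMap (fun tup => choice.map (fun p => tup ++ [p]))) [[]]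
  prods.map (fun values => (PySem.Dict.ofList values).items)

-- ===== PORT B =====
def combine_variable_choices_alt : List (String × List String) → List (List (String × String))
  | [] => [[]]
  | (k, vals) :: rest =>
      vals.flatMap (fun v => (combine_variable_choices_alt rest).map (fun sub => (k, v) :: sub))

-- ===== PRECONDITION & SPEC =====
-- Pre_ excludes association lists with duplicate keys: they do not represent any Python dict
-- input (a Python dict collapses them), so any behaviour there is an artefact of the encoding.
def Pre_combine_variable_choices (variables_choices : List (String × List String)) : Prop :=
  (variables_choices.map Prod.fst).Nodup
instance (variables_choices : List (String × List String)) : Decidable (Pre_combine_variable_choices variables_choices) := by unfold Pre_combine_variable_choices; infer_instance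

def pvWitness_combine_variable_choices : (List (String × List String)) :=
  [("a", ["x", "y"]), ("b", ["u"])]

def Spec_combine_variable_choices (variables_choices : List (String × List String)) (out : List (List (String × String))) : Prop := out = combine_variable_choices_alt variables_choices
instance (variables_choices : List (String × List String)) (out : List (List (String × String))) : Decidable (Spec_combine_variable_choices variables_choices out) := by unfold Spec_combine_variable_choices; infer_instance

-- ===== CLAIM (what is proved, stated in full; the proofs are below) =====
def Claim_equal_combine_variable_choices : Prop := ∀ (variables_choices : List (String × List String)), Dom_combine_variable_choices variables_choices → Pre_combine_variable_choices variables_choices → Spec_combine_variable_choices variables_choices (combine_variable_choices variables_choices)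

-- ===== LEMMAS AND PROOFS =====

-- A's product fold, started from any accumulator, is B's recursion appended behind each tuple.
theorem prod_foldl_eq_alt (vc : List (String × List String))
    (acc : List (List (String × String))) :
    (vc.map (fun kv => kv.2.map (fun v => (kv.1, v)))).foldl
      (fun acc choice => acc.flatMap (fun tup => choice.map (fun p => tup ++ [p]))) acc
    = acc.flatMap (fun t => (combine_variable_choices_alt vc).map (fun s => t ++ s)) := by
  induction vc generalizing acc with
  | nil => simp [combine_variable_choices_alt]
  | cons kv rest ih =>
      obtain ⟨k, vals⟩ := kv
      simp only [List.map_cons, List.foldl_cons, ih, combine_variable_choices_alt]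
      simp [List.flatMap_assoc, List.flatMap_map, List.map_flatMap, List.map_map, Function.comp_def, List.append_assoc]

-- every tuple produced by B's recursion carries the keys of vc, in order
theorem keys_of_mem_alt (vc : List (String × List String))
    (sub : List (String × String)) (h : sub ∈ combine_variable_choices_alt vc) :
    sub.map Prod.fst = vc.map Prod.fst := by
  induction vc generalizing sub with
  | nil =>
      simp [combine_variable_choices_alt] at h
      simp [h]
  | cons kv rest ih =>
      obtain ⟨k, vals⟩ := kv
      simp only [combine_variable_choices_alt, List.mem_flatMap, List.mem_map] at h
      obtain ⟨v, _, s, hs, rfl⟩ := h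
      simp [ih s hs]

-- dict(values) on a list with pairwise-distinct keys is the identity
theorem ofList_items_of_nodup (values : List (String × String))
    (h : (values.map Prod.fst).Nodup) :
    (PySem.Dict.ofList values).items = values := by
  have := PySem.Dict.items_foldl_insert_fresh (l := values) (k := Prod.fst) (v := Prod.snd)
    (d := (PySem.Dict.empty : PySem.Dict String String))
    (by intro a _; exact PySem.Dict.contains_empty _) h
  simpa [PySem.Dict.ofList] using this

-- ===== VERDICT (by name: the statement is the Claim_ definition above) =====
theorem combine_variable_choices_spec : Claim_equal_combine_variable_choices := by
  intro vc _ hpre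
  unfold Spec_combine_variable_choices combine_variable_choices
  simp only [prod_foldl_eq_alt]
  simp only [List.flatMap_cons, List.flatMap_nil, List.nil_append, List.append_nil, List.map_id']
  rw [List.map_congr_left (fun sub hsub =>
    ofList_items_of_nodup sub (by rw [keys_of_mem_alt vc sub hsub]; exact hpre))]
  simp
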